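-- pv_equiv track=rewrite | github.com/armadillica/flamenco | flamenco/utils.py | frame_range_merge
-- ===== SOURCE A (Python) =====
-- def frame_range_merge(frames_list=None, blender_style=False):
--     """Given a frames list, merge them and return them as range of frames.
--
--     :type frames_list: list
--     :type blender_style: bool
--     :param blender_style: whether to use Blender style frame range notation (3..5) or not (3-5).
--     :rtype: str
--
--     :Example:
--     >>> frames = [1, 3, 4, 5, 8]
--     >>> frame_range_merge(frames)
--     u'1,3-5,8'
--     >>> frame_range_merge(frames, blender_style=True)
--     u'1,3..5,8'
--     """
--     if not frames_list:
--         return ""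
--
--     range_sep = '..' if blender_style else '-'
--
--     ranges = []
--     current_frame = start_frame = prev_frame = frames_list[0]
--     n = len(frames_list)
--     for i in range(1, n):
--         current_frame = frames_list[i]
--         if current_frame == prev_frame + 1:
--             pass
--         else:
--             if start_frame == prev_frame:
--                 ranges.append(str(start_frame))
--             elif start_frame + 1 == prev_frame:
--                 ranges.append(str(start_frame))
--                 ranges.append(str(prev_frame))
--             else:
--                 ranges.append('{}{}{}'.format(start_frame, range_sep, prev_frame))
--             start_frame = current_frame
--         prev_frame = current_frame
--     if start_frame == current_frame:
--         ranges.append(str(start_frame))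
--     elif start_frame + 1 == current_frame:
--         ranges.append(str(start_frame))
--         ranges.append(str(current_frame))
--     else:
--         ranges.append('{}{}{}'.format(start_frame, range_sep, current_frame))
--     return ','.join(ranges)
-- ===== SOURCE B (Python) =====
-- def frame_range_merge(frames_list=None, blender_style=False):
--     """Two-phase re-implementation: first split the list into maximal
--     consecutive runs, then format each run by its length."""
--     if not frames_list:
--         return ""
--     sep = '..' if blender_style else '-'
--     runs = []
--     run = [frames_list[0]]
--     for f in frames_list[1:]:
--         if f == run[-1] + 1:
--             run.append(f)
--         else:
--             runs.append(run)
--             run = [f]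
--     runs.append(run)
--     parts = []
--     for run in runs:
--         if len(run) == 1:
--             parts.append(str(run[0]))
--         elif len(run) == 2:
--             parts.append(str(run[0]))
--             parts.append(str(run[1]))
--         else:
--             parts.append('{}{}{}'.format(run[0], sep, run[-1]))
--     return ','.join(parts)
-- ===== Notes on version B (the rewrite author's own statement) =====
-- stated objective: simpler
-- what changed: Replaces A's single-pass state machine with start/prev sentinels and duplicated value-comparison emit blocks by a two-phase decomposition: split the list into maximal consecutive runs, then format each run by its length.
import Mathlib
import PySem

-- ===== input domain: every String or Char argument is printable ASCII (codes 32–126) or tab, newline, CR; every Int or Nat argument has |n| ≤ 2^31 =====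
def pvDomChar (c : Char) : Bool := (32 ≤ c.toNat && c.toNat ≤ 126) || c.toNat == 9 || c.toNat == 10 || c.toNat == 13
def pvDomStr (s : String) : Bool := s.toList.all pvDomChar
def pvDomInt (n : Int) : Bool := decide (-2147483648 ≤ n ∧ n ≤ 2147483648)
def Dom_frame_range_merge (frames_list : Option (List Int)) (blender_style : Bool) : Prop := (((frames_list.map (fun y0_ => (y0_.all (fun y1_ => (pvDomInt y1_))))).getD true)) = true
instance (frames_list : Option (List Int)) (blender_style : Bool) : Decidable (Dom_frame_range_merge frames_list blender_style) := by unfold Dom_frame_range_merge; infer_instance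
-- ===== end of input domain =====

-- B replaces A's single-pass start/prev state machine by a two-phase split-into-runs-then-format decomposition (simpler); same return value everywhere.

-- ===== PORT A =====
-- A's for-loop over frames_list[1:], state = (ranges, start_frame, prev_frame, current_frame);
-- the [] case is A's code after the loop (which reads start_frame and current_frame)
def aLoop (sep : String) (ranges : List String) (start prev current : Int) :
    List Int → List String
  | [] =>
      if start = current then ranges ++ [PySem.Int.toStr start]
      else if start + 1 = current then
        ranges ++ [PySem.Int.toStr start, PySem.Int.toStr current]
      else ranges ++ [PySem.Int.toStr start ++ sep ++ PySem.Int.toStr current]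
  | x :: xs =>
      -- current_frame = x; then prev_frame = current_frame at the loop bottom
      if x = prev + 1 then aLoop sep ranges start x x xs
      else
        let ranges' :=
          if start = prev then ranges ++ [PySem.Int.toStr start]
          else if start + 1 = prev then
            ranges ++ [PySem.Int.toStr start, PySem.Int.toStr prev]
          else ranges ++ [PySem.Int.toStr start ++ sep ++ PySem.Int.toStr prev]
        aLoop sep ranges' x x x xs

def frame_range_merge (frames_list : Option (List Int)) (blender_style : Bool) : String :=
  match frames_list with
  | none => ""                          -- `if not frames_list`
  | some [] => ""
  | some (f :: rest) =>
      let sep := if blender_style then ".." else "-"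
      PySem.Str.join "," (aLoop sep [] f f f rest)

-- ===== PORT B =====
-- phase 1 of B: the run-building loop, state = (runs, run); run is always nonempty (run[-1] = getLastD _ 0)
def bStep (st : List (List Int) × List Int) (f : Int) : List (List Int) × List Int :=
  if f = st.2.getLastD 0 + 1 then (st.1, st.2 ++ [f]) else (st.1 ++ [st.2], [f])

-- phase 2 of B: format one run by its length (run[0], run[1], run[-1])
def bPiece (sep : String) : List Int → List String
  | [] => []
  | [a] => [PySem.Int.toStr a]
  | [a, b] => [PySem.Int.toStr a, PySem.Int.toStr b]
  | a :: b :: c :: r =>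
      [PySem.Int.toStr a ++ sep ++ PySem.Int.toStr ((b :: c :: r).getLastD a)]

def frame_range_merge_alt (frames_list : Option (List Int)) (blender_style : Bool) : String :=
  match frames_list with
  | none => ""
  | some [] => ""
  | some (f :: rest) =>
      let sep := if blender_style then ".." else "-"
      let st := rest.foldl bStep ([], [f])
      let runs := st.1 ++ [st.2]
      PySem.Str.join "," (runs.flatMap (bPiece sep))

-- ===== PRECONDITION & SPEC =====
def Spec_frame_range_merge (frames_list : Option (List Int)) (blender_style : Bool) (out : String) : Prop := out = frame_range_merge_alt frames_list blender_style
instance (frames_list : Option (List Int)) (blender_style : Bool) (out : String) : Decidable (Spec_frame_range_merge frames_list blender_style out) := by unfold Spec_frame_range_merge; infer_instance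

-- ===== CLAIM (what is proved, stated in full; the proofs are below) =====
def Claim_equal_frame_range_merge : Prop := ∀ (frames_list : Option (List Int)) (blender_style : Bool), Dom_frame_range_merge frames_list blender_style → Spec_frame_range_merge frames_list blender_style (frame_range_merge frames_list blender_style)

-- ===== LEMMAS AND PROOFS =====

-- A's repeated three-branch emit block, as one function
def fmt (sep : String) (s p : Int) : List String :=
  if s = p then [PySem.Int.toStr s]
  else if s + 1 = p then [PySem.Int.toStr s, PySem.Int.toStr p]
  else [PySem.Int.toStr s ++ sep ++ PySem.Int.toStr p]

-- the maximal consecutive run continuing prev, and the rest of the list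
def takeRun (p : Int) : List Int → List Int × List Int
  | [] => ([], [])
  | x :: xs =>
      if x = p + 1 then (x :: (takeRun x xs).1, (takeRun x xs).2)
      else ([], x :: xs)

theorem takeRun_snd_length (p : Int) (l : List Int) :
    (takeRun p l).2.length ≤ l.length := by
  induction l generalizing p with
  | nil => simp [takeRun]
  | cons x xs ih =>
      simp only [takeRun]
      split
      · simpa using (ih x).trans (Nat.le_succ _)
      · simp

def splitRuns : List Int → List (List Int)
  | [] => []
  | x :: xs =>
      (x :: (takeRun x xs).1) :: splitRuns (takeRun x xs).2
termination_by l => l.length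
decreasing_by
  have := takeRun_snd_length x xs
  simp only [List.length_cons]
  omega

theorem splitRuns_nil : splitRuns [] = [] := by
  unfold splitRuns
  rfl

theorem splitRuns_cons (x : Int) (xs : List Int) :
    splitRuns (x :: xs) = (x :: (takeRun x xs).1) :: splitRuns (takeRun x xs).2 := by
  unfold splitRuns
  congr 1
  conv_lhs => unfold splitRuns

theorem takeRun_last (l : List Int) (p : Int) :
    (takeRun p l).1.getLastD p = p + (takeRun p l).1.length := by
  induction l generalizing p with
  | nil => simp [takeRun]
  | cons x xs ih =>
      simp only [takeRun]
      split
      · rename_i hx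
        have h := ih x
        rw [List.getLastD_cons]
        simp only [List.length_cons]
        omega
      · simp

theorem bPiece_fmt (sep : String) (l : List Int) (p : Int) :
    bPiece sep (p :: (takeRun p l).1) = fmt sep p ((takeRun p l).1.getLastD p) := by
  have hl := takeRun_last l p
  cases h : (takeRun p l).1 with
  | nil => simp [bPiece, fmt]
  | cons b r =>
      rw [h] at hl
      cases r with
      | nil =>
          simp only [List.getLastD_cons, List.getLastD_nil, List.length_cons,
            List.length_nil] at hl
          simp only [bPiece, fmt, List.getLastD_cons, List.getLastD_nil]
          rw [if_neg (by omega), if_pos (by omega)]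
      | cons c r' =>
          simp only [List.getLastD_cons, List.length_cons] at hl
          simp only [bPiece, fmt, List.getLastD_cons]
          rw [if_neg (by omega), if_neg (by omega)]

theorem aLoop_nil (sep : String) (ranges : List String) (s p c : Int) :
    aLoop sep ranges s p c [] = ranges ++ fmt sep s c := by
  simp only [aLoop, fmt]
  split_ifs <;> rfl

theorem aLoop_cons (sep : String) (ranges : List String) (s p c x : Int) (xs : List Int) :
    aLoop sep ranges s p c (x :: xs) =
      if x = p + 1 then aLoop sep ranges s x x xs
      else aLoop sep (ranges ++ fmt sep s p) x x x xs := by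
  simp only [aLoop, fmt]
  split_ifs <;> rfl

theorem aLoop_acc (sep : String) (l : List Int) (ranges : List String) (s p : Int) :
    aLoop sep ranges s p p l = ranges ++ aLoop sep [] s p p l := by
  induction l generalizing ranges s p with
  | nil => rw [aLoop_nil, aLoop_nil]; simp
  | cons x xs ih =>
      rw [aLoop_cons, aLoop_cons]
      split_ifs
      · rw [ih, ih []]
      · rw [ih, ih (([] : List String) ++ fmt sep s p)]
        simp

theorem aLoop_split (sep : String) (l : List Int) (s p : Int) :
    aLoop sep [] s p p l =
      fmt sep s ((takeRun p l).1.getLastD p) ++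
        (splitRuns (takeRun p l).2).flatMap (bPiece sep) := by
  induction l generalizing s p with
  | nil => simp [aLoop_nil, takeRun, splitRuns_nil]
  | cons x xs ih =>
      rw [aLoop_cons]
      split_ifs with hx
      · rw [ih]
        simp only [takeRun, if_pos hx, List.getLastD_cons]
      · rw [aLoop_acc, ih]
        simp only [takeRun, if_neg hx, splitRuns_cons, List.flatMap_cons,
          bPiece_fmt sep xs x, List.getLastD_nil]
        simp

theorem bFold_split (l : List Int) (runs : List (List Int)) (run : List Int) (p : Int)
    (hne : run ≠ []) (hp : run.getLastD 0 = p) :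
    (l.foldl bStep (runs, run)).1 ++ [(l.foldl bStep (runs, run)).2] =
      runs ++ ((run ++ (takeRun p l).1) :: splitRuns (takeRun p l).2) := by
  induction l generalizing runs run p with
  | nil => simp [takeRun, splitRuns_nil]
  | cons x xs ih =>
      simp only [List.foldl_cons, bStep, hp]
      split_ifs with hx
      · rw [ih runs (run ++ [x]) x (by simp) (by simp)]
        simp only [takeRun, if_pos hx]
        simp [List.append_assoc]
      · rw [ih (runs ++ [run]) [x] x (by simp) (by simp)]
        simp only [takeRun, if_neg hx, splitRuns_cons]
        simp

-- ===== VERDICT (by name: the statement is the Claim_ definition above) =====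
theorem frame_range_merge_spec : Claim_equal_frame_range_merge := by
  intro frames_list blender_style _
  unfold Spec_frame_range_merge
  match frames_list with
  | none => rfl
  | some [] => rfl
  | some (f :: rest) =>
      simp only [frame_range_merge, frame_range_merge_alt]
      rw [bFold_split rest [] [f] f (by simp) (by simp), aLoop_split]
      simp [bPiece_fmt (if blender_style then ".." else "-") rest f]
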